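-- pv_equiv track=rewrite | github.com/kkr010128/codebert | problem193/problem193_26.py | settify
-- ===== SOURCE A (Python) =====
-- def settify(l):
--   set_label = set()
--   i = 0
--   while l > 0:
--     if l % 2 == 1:
--       set_label.add(i)
--     l //= 2
--     i += 1
--   return set_label
-- ===== SOURCE B (Python) =====
-- def settify(l):
--     if l <= 0:
--         return set()
--     s = bin(l)[2:]
--     return {i for i, c in enumerate(reversed(s)) if c == '1'}
-- ===== Notes on version B (the rewrite author's own statement) =====
-- stated objective: idiomatic
-- what changed: B computes the binary representation once with bin(l) and collects the indices of '1' characters in one comprehension over the reversed string, instead of A's while loop that repeatedly floor-divides and tests the low bit.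
import Mathlib
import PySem

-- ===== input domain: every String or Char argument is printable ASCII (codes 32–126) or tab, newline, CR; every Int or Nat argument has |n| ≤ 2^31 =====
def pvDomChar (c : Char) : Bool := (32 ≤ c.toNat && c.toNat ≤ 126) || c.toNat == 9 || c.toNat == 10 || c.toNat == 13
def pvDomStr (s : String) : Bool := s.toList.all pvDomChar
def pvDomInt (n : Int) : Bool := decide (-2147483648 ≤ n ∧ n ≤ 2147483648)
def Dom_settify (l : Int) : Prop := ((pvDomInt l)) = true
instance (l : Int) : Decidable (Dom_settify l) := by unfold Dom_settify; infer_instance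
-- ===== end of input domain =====

-- B builds the binary representation once with bin() and collects the indices of
-- '1' characters in one pass over the reversed digit string, instead of A's
-- divide-by-two loop (a more idiomatic decomposition; same cost).

-- ===== PORT A =====
-- while l > 0: if l % 2 == 1: set_label.add(i); l //= 2; i += 1
def settifyLoop (l i : Int) (s : List Int) : List Int :=
  if 0 < l then
    settifyLoop (PySem.Int.floordiv l 2) (i + 1)
      (if PySem.Int.mod l 2 = 1 then PySem.Set.add s i else s)
  else s
termination_by l.toNat
decreasing_by
  have := PySem.Int.floordiv_eq_ediv_of_pos (a := l) (b := 2) (by omega)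
  omega

def settify (l : Int) : List Int := settifyLoop l 0 []

-- ===== PORT B =====
-- bin(l)[2:] : the binary digits of l, most significant first (for 0 < l)
def binChars (l : Int) : List Char :=
  if 0 < l then
    binChars (PySem.Int.floordiv l 2) ++ [if PySem.Int.mod l 2 = 1 then '1' else '0']
  else []
termination_by l.toNat
decreasing_by
  have := PySem.Int.floordiv_eq_ediv_of_pos (a := l) (b := 2) (by omega)
  omega

-- {i for i, c in enumerate(reversed(s)) if c == '1'}
def settify_alt (l : Int) : List Int :=
  if l ≤ 0 then []
  else
    PySem.Set.ofList
      ((PySem.List.enumerate (binChars l).reverse 0).filterMap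
        (fun p => if p.2 = '1' then some p.1 else none))

-- ===== PRECONDITION & SPEC =====
def Spec_settify (l : Int) (out : List Int) : Prop := out = settify_alt l
instance (l : Int) (out : List Int) : Decidable (Spec_settify l out) := by unfold Spec_settify; infer_instance

-- ===== CLAIM (what is proved, stated in full; the proofs are below) =====
def Claim_equal_settify : Prop := ∀ (l : Int), Dom_settify l → Spec_settify l (settify l)

-- ===== LEMMAS AND PROOFS =====

-- the ascending list of set-bit positions: the shape both ports reduce to
def posList (l : Int) : List Int :=
  if 0 < l then
    (if PySem.Int.mod l 2 = 1 then [(0 : Int)] else []) ++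
      (posList (PySem.Int.floordiv l 2)).map (· + 1)
  else []
termination_by l.toNat
decreasing_by
  have := PySem.Int.floordiv_eq_ediv_of_pos (a := l) (b := 2) (by omega)
  omega

theorem posList_nonneg : ∀ (l : Int), ∀ x ∈ posList l, 0 ≤ x := by
  intro l
  induction l using posList.induct with
  | case1 l hl ih =>
    rw [posList, if_pos hl]
    intro x hx
    rcases List.mem_append.1 hx with h | h
    · split at h <;> simp_all
    · rcases List.mem_map.1 h with ⟨y, hy, rfl⟩
      have := ih y hy; omega
  | case2 l hl => rw [posList, if_neg hl]; simp

theorem posList_nodup : ∀ (l : Int), (posList l).Nodup := by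
  intro l
  induction l using posList.induct with
  | case1 l hl ih =>
    rw [posList, if_pos hl]
    have hmap : ((posList (PySem.Int.floordiv l 2)).map (· + 1)).Nodup :=
      ih.map (fun a b h => by omega)
    split
    · refine List.Nodup.append ?_ hmap ?_
      · simp
      · intro x hx hy
        simp only [List.mem_singleton] at hx; subst hx
        rcases List.mem_map.1 hy with ⟨y, hy', h⟩
        have := posList_nonneg _ y hy'; omega
    · simpa using hmap
  | case2 l hl => rw [posList, if_neg hl]; simp

-- A's while loop appends the shifted bit positions to the accumulated set
theorem loop_eq : ∀ (n : Nat) (l i : Int) (s : List Int), l.toNat ≤ n → (∀ x ∈ s, x < i) →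
    settifyLoop l i s = s ++ (posList l).map (· + i) := by
  intro n
  induction n with
  | zero =>
    intro l i s hn hs
    have hl : ¬ 0 < l := by omega
    rw [settifyLoop, if_neg hl, posList, if_neg hl]; simp
  | succ n ih =>
    intro l i s hn hs
    by_cases hl : 0 < l
    · rw [settifyLoop, if_pos hl, posList, if_pos hl]
      have hdiv := PySem.Int.floordiv_eq_ediv_of_pos (a := l) (b := 2) (by omega)
      have hrec : (PySem.Int.floordiv l 2).toNat ≤ n := by omega
      by_cases hm : PySem.Int.mod l 2 = 1
      · have hadd : PySem.Set.add s i = s ++ [i] := by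
          simp [PySem.Set.add, PySem.Set.contains]
          intro h; exact absurd (hs i h) (by omega)
        rw [if_pos hm, if_pos hm, hadd,
          ih (PySem.Int.floordiv l 2) (i + 1) (s ++ [i]) hrec ?_]
        · simp [List.map_map]
          intro a _; omega
        · intro x hx
          rcases List.mem_append.1 hx with h | h
          · exact lt_trans (hs x h) (by omega)
          · simp at h; omega
      · rw [if_neg hm, if_neg hm,
          ih (PySem.Int.floordiv l 2) (i + 1) s hrec (fun x hx => lt_trans (hs x hx) (by omega))]
        simp [List.map_map]
        intro a _; omega
    · rw [settifyLoop, if_neg hl, posList, if_neg hl]; simp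

theorem foldl_add_nodup (xs : List Int) : ∀ (acc : List Int), (∀ x ∈ xs, x ∉ acc) → xs.Nodup →
    xs.foldl PySem.Set.add acc = acc ++ xs := by
  induction xs with
  | nil => simp
  | cons x xs ih =>
    intro acc hni hnd
    simp only [List.foldl_cons]
    have hx : PySem.Set.add acc x = acc ++ [x] := by
      simp [PySem.Set.add, PySem.Set.contains]
      intro h
      exact absurd h (hni x (by simp))
    rw [hx, ih (acc ++ [x]) ?_ hnd.of_cons]
    · simp
    · intro y hy
      simp only [List.mem_append, List.mem_singleton, not_or]
      exact ⟨hni y (by simp [hy]), fun h => by subst h; exact (List.nodup_cons.1 hnd).1 hy⟩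

theorem ofList_nodup (xs : List Int) (h : xs.Nodup) : PySem.Set.ofList xs = xs := by
  rw [PySem.Set.ofList_eq_foldl, foldl_add_nodup xs [] (by simp) h]; simp

-- B's comprehension body, as a function of the character list
def collect (cs : List Char) : List Int :=
  (PySem.List.enumerate cs 0).filterMap (fun p => if p.2 = '1' then some p.1 else none)

theorem collect_shift : ∀ (cs : List Char) (k : Int),
    (PySem.List.enumerate cs k).filterMap (fun p => if p.2 = '1' then some p.1 else none)
      = (collect cs).map (· + k) := by
  intro cs
  induction cs with
  | nil => intro k; simp [collect, PySem.List.enumerate_nil]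
  | cons c cs ih =>
    intro k
    simp only [collect, PySem.List.enumerate_cons, List.filterMap_cons] at *
    rw [ih (k + 1), ih (0 + 1)]
    by_cases h : c = '1'
    · simp only [h, reduceIte, List.map_cons, List.map_map]
      congr 1
      · omega
      · exact List.map_congr_left (fun x _ => by simp [Function.comp]; omega)
    · simp only [if_neg h, List.map_map]
      exact List.map_congr_left (fun x _ => by simp [Function.comp]; omega)

theorem collect_cons (c : Char) (cs : List Char) :
    collect (c :: cs) = (if c = '1' then [(0 : Int)] else []) ++ (collect cs).map (· + 1) := by
  simp only [collect, PySem.List.enumerate_cons, List.filterMap_cons]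
  rw [collect_shift cs (0 + 1)]
  by_cases h : c = '1'
  · simp only [h, reduceIte, List.singleton_append, collect]
    congr 1
  · simp only [if_neg h, List.nil_append, collect]
    exact List.map_congr_left (fun x _ => by omega)

theorem binChars_reverse (l : Int) (hl : 0 < l) :
    (binChars l).reverse
      = (if PySem.Int.mod l 2 = 1 then '1' else '0') :: (binChars (PySem.Int.floordiv l 2)).reverse := by
  conv_lhs => rw [binChars, if_pos hl]
  simp

theorem collect_binChars : ∀ (l : Int), collect (binChars l).reverse = posList l := by
  intro l
  induction l using posList.induct with
  | case1 l hl ih =>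
    rw [binChars_reverse l hl, collect_cons, posList, if_pos hl, ih]
    congr 1
    split_ifs with h h2 h2 <;> simp_all
  | case2 l hl =>
    rw [posList, if_neg hl, binChars, if_neg hl]
    simp [collect, PySem.List.enumerate_nil]

-- ===== VERDICT (by name: the statement is the Claim_ definition above) =====
theorem settify_spec : Claim_equal_settify := by
  intro l _
  unfold Spec_settify settify settify_alt
  rw [loop_eq l.toNat l 0 [] (le_refl _) (by simp)]
  by_cases hl : 0 < l
  · rw [if_neg (by omega)]
    have h := collect_binChars l
    unfold collect at h
    rw [h, ofList_nodup _ (posList_nodup l)]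
    simp
  · rw [if_pos (by omega), posList, if_neg hl]; simp
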